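-- pv_equiv track=rewrite | github.com/baijiazai/PythonDemo | 数据结构/greed.py | get_binary_rep
-- ===== SOURCE A (Python) =====
-- def get_binary_rep(n, num_digits):
--     """ n 和 num_digits 为非负整数 """
--     res = ''
--     while n > 0:
--         res = str(n % 2) + res
--         n //= 2
--     if len(res) > num_digits:
--         raise ValueError('not enough digits')
--     for i in range(num_digits - len(res)):
--         res = '0' + res
--     return res
-- ===== SOURCE B (Python) =====
-- def get_binary_rep(n, num_digits):
--     """ n 和 num_digits 为非负整数 """
--     if n.bit_length() > num_digits:
--         raise ValueError('not enough digits')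
--     return ''.join(str((n >> i) & 1) for i in range(num_digits - 1, -1, -1))
-- ===== Notes on version B (the rewrite author's own statement) =====
-- stated objective: faster
-- what changed: A builds the string LSB-first by repeated mod/div with quadratic string prepends plus a separate zero-padding loop; B checks overflow up front via bit_length and emits the fixed-width result in one MSB-to-LSB join over bit positions using shift-and-mask, with no mutable accumulator and no padding pass.
-- outside the precondition, e.g. on get_binary_rep(-3, 4): A returns '0000', B returns '1101'; on get_binary_rep(-9, 2): A returns '00', B raises ValueError
import Mathlib
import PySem

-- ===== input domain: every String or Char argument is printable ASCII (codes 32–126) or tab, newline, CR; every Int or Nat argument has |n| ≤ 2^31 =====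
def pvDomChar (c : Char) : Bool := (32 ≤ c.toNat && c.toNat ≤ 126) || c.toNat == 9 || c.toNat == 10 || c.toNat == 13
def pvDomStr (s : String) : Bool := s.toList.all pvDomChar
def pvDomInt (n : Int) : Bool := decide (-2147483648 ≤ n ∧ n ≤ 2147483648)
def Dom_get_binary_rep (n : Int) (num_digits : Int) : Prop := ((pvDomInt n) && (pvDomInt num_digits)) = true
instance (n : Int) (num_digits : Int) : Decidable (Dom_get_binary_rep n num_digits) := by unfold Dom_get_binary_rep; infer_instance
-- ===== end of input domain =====

-- B replaces A's LSB-first mod/div prepend loop + separate padding loop by an up-front bit_length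
-- overflow check and one MSB-to-LSB shift-and-mask join (objective: alternative decomposition).
-- Return-value equivalence on the docstring's domain (both arguments nonnegative).

-- ===== PORT A =====
-- while n > 0: res = str(n % 2) + res; n //= 2
def pvALoop (n : Int) (res : String) : String :=
  if 0 < n then
    pvALoop (PySem.Int.floordiv n 2) (PySem.Int.toStr (PySem.Int.mod n 2) ++ res)
  else res
termination_by n.toNat
decreasing_by
  have h2 : PySem.Int.floordiv n 2 = n / 2 := PySem.Int.floordiv_eq_ediv_of_pos (by omega)
  rw [h2]; omega

def get_binary_rep (n : Int) (num_digits : Int) : String :=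
  let res := pvALoop n ""
  if PySem.Str.len res > num_digits then ""  -- raise ValueError('not enough digits'); excluded by Pre_
  else (PySem.List.pyRange 0 (num_digits - PySem.Str.len res) 1).foldl (fun acc _ => "0" ++ acc) res

-- ===== PORT B =====
def get_binary_rep_alt (n : Int) (num_digits : Int) : String :=
  if (PySem.Int.bitLength n : Int) > num_digits then ""  -- raise ValueError('not enough digits'); excluded by Pre_
  else
    -- ''.join(str((n >> i) & 1) for i in range(num_digits - 1, -1, -1)); every i in this range is ≥ 0
    PySem.Str.join ""
      ((PySem.List.pyRange (num_digits - 1) (-1) (-1)).map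
        (fun i => PySem.Int.toStr (PySem.Int.band (n >>> i.toNat) 1)))

-- ===== PRECONDITION & SPEC =====
-- Pre_ restricts to the docstring's natural domain (both arguments nonnegative) and excludes the
-- overflow raise; on negative n, which the docstring excludes, A's all-zero output is an accident of
-- its implementation (the loop never runs) while B's shift-and-mask reads two's-complement bits.
def Pre_get_binary_rep (n : Int) (num_digits : Int) : Prop :=
  0 ≤ n ∧ 0 ≤ num_digits ∧ (PySem.Int.bitLength n : Int) ≤ num_digits
instance (n : Int) (num_digits : Int) : Decidable (Pre_get_binary_rep n num_digits) := by
  unfold Pre_get_binary_rep; infer_instance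
def pvWitness_get_binary_rep : Int × Int := (5, 4)

def Spec_get_binary_rep (n : Int) (num_digits : Int) (out : String) : Prop := out = get_binary_rep_alt n num_digits
instance (n : Int) (num_digits : Int) (out : String) : Decidable (Spec_get_binary_rep n num_digits out) := by unfold Spec_get_binary_rep; infer_instance

-- ===== CLAIM (what is proved, stated in full; the proofs are below) =====
def Claim_equal_get_binary_rep : Prop := ∀ (n : Int) (num_digits : Int), Dom_get_binary_rep n num_digits → Pre_get_binary_rep n num_digits → Spec_get_binary_rep n num_digits (get_binary_rep n num_digits)

-- ===== LEMMAS AND PROOFS =====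

-- canonical binary digit list of a Nat (empty for 0), MSB first
def pvBin (m : Nat) : List Char :=
  if m = 0 then [] else pvBin (m / 2) ++ [if m % 2 = 1 then '1' else '0']
decreasing_by exact Nat.div_lt_self (Nat.pos_of_ne_zero (by assumption)) (by norm_num)

theorem pvBin_zero : pvBin 0 = [] := by rw [pvBin]; simp

theorem pvBin_pos {m : Nat} (h0 : m ≠ 0) :
    pvBin m = pvBin (m / 2) ++ [if m % 2 = 1 then '1' else '0'] := by
  conv_lhs => rw [pvBin]
  rw [if_neg h0]

theorem pvALoop_eq (m : Nat) : ∀ s : String, pvALoop (m : Int) s = String.ofList (pvBin m ++ s.toList) := by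
  induction m using Nat.strong_induction_on with
  | _ m ih =>
    intro s
    rw [pvALoop]
    by_cases h0 : m = 0
    · subst h0; rw [pvBin_zero]; simp
    · have hpos : (0:Int) < (m:Int) := by exact_mod_cast Nat.pos_of_ne_zero h0
      rw [if_pos hpos]
      have hfd : PySem.Int.floordiv (m:Int) 2 = ((m/2 : Nat):Int) := by
        exact_mod_cast PySem.Int.floordiv_natCast m 2
      have hmd : PySem.Int.mod (m:Int) 2 = ((m%2 : Nat):Int) := by
        exact_mod_cast PySem.Int.mod_natCast m 2
      rw [hfd, hmd, ih (m/2) (Nat.div_lt_self (Nat.pos_of_ne_zero h0) one_lt_two)]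
      rw [pvBin_pos h0]
      have c0 : (PySem.Int.toStr (0:Int)).toList = ['0'] := by decide
      have c1 : (PySem.Int.toStr (1:Int)).toList = ['1'] := by decide
      rcases Nat.mod_two_eq_zero_or_one m with h | h <;> rw [h] <;> simp [c0, c1]

theorem pvBin_length (m : Nat) : (pvBin m).length = PySem.Int.bitLength (m : Int) := by
  induction m using Nat.strong_induction_on with
  | _ m ih =>
    by_cases h0 : m = 0
    · subst h0; rw [pvBin_zero]; simp [PySem.Int.bitLength_zero]
    · rw [pvBin_pos h0,
        PySem.Int.bitLength_natCast (Nat.pos_of_ne_zero h0),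
        ← ih (m/2) (Nat.div_lt_self (Nat.pos_of_ne_zero h0) one_lt_two)]
      simp

-- the MSB-first fixed-width bit list
def pvMsb (m : Nat) : Nat → List Char
  | 0 => []
  | d + 1 => (if (m >>> d) &&& 1 = 1 then '1' else '0') :: pvMsb m d

theorem pvMsb_lsb (m : Nat) : ∀ d, pvMsb m (d + 1) = pvMsb (m / 2) d ++ [if m % 2 = 1 then '1' else '0'] := by
  intro d
  induction d with
  | zero => simp [pvMsb, Nat.and_one_is_mod]
  | succ d ih =>
    have hsh : m >>> (d + 1) = (m / 2) >>> d := by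
      simp [Nat.shiftRight_eq_div_pow, Nat.pow_succ, Nat.div_div_eq_div_mul, Nat.mul_comm]
    calc pvMsb m (d + 2) = (if (m >>> (d+1)) &&& 1 = 1 then '1' else '0') :: pvMsb m (d+1) := rfl
      _ = (if ((m/2) >>> d) &&& 1 = 1 then '1' else '0') :: (pvMsb (m/2) d ++ [if m % 2 = 1 then '1' else '0']) := by rw [hsh, ih]
      _ = pvMsb (m/2) (d+1) ++ [if m % 2 = 1 then '1' else '0'] := rfl

theorem pvMsb_eq_pad (d : Nat) : ∀ m : Nat, (pvBin m).length ≤ d →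
    pvMsb m d = List.replicate (d - (pvBin m).length) '0' ++ pvBin m := by
  induction d with
  | zero =>
    intro m h
    have hlen : (pvBin m).length = 0 := Nat.le_zero.mp h
    rw [List.length_eq_zero_iff.mp hlen]; simp [pvMsb]
  | succ d ih =>
    intro m h
    rw [pvMsb_lsb]
    by_cases h0 : m = 0
    · subst h0
      have h02 : (0:Nat)/2 = 0 := rfl
      rw [h02, ih 0 (by simp [pvBin_zero]), pvBin_zero]
      simp [List.replicate_succ']
    · have hlen : (pvBin m).length = (pvBin (m/2)).length + 1 := by rw [pvBin_pos h0]; simp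
      have hle : (pvBin (m/2)).length ≤ d := by omega
      rw [ih (m/2) hle]
      conv_rhs => rw [pvBin_pos h0]
      simp only [List.length_append, List.length_cons, List.length_nil]
      have hc : d + 1 - ((pvBin (m/2)).length + (0 + 1)) = d - (pvBin (m/2)).length := by omega
      rw [hc, List.append_assoc]

theorem pvMsb_eq_map (m : Nat) : ∀ d, pvMsb m d =
    (List.range d).map (fun k => if (m >>> (d - 1 - k)) &&& 1 = 1 then '1' else '0') := by
  intro d
  induction d with
  | zero => simp [pvMsb]
  | succ d ih =>
    show (if (m >>> d) &&& 1 = 1 then '1' else '0') :: pvMsb m d = _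
    rw [List.range_succ_eq_map, List.map_cons, List.map_map, ih]
    congr 1
    apply List.map_congr_left
    intro k hk
    have he : d - (k + 1) = d - 1 - k := by omega
    simp only [Function.comp_apply, Nat.succ_eq_add_one, Nat.add_sub_cancel, he]

-- the padding for-loop of A prepends one '0' per range element
theorem pvFoldPad (l : List Int) : ∀ s : String,
    l.foldl (fun acc _ => "0" ++ acc) s = String.ofList (List.replicate l.length '0' ++ s.toList) := by
  induction l with
  | nil => intro s; simp
  | cons x tl ih =>
    intro s
    rw [List.foldl_cons, ih]
    simp [List.replicate_succ']

-- ===== VERDICT (by name: the statement is the Claim_ definition above) =====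
theorem get_binary_rep_spec : Claim_equal_get_binary_rep := by
  intro n d _ hpre
  obtain ⟨hn, hd, hbl⟩ := hpre
  unfold Spec_get_binary_rep
  set m := n.toNat with hm
  have hnm : n = (m : Int) := by omega
  set D := d.toNat with hD
  have hdD : d = (D : Int) := by omega
  set L := (pvBin m).length with hL
  have hLbl : (L : Int) = (PySem.Int.bitLength n : Int) := by
    rw [hL, hnm]; exact_mod_cast pvBin_length m
  have hLD : L ≤ D := by omega
  -- A side
  have hres : pvALoop n "" = String.ofList (pvBin m) := by
    rw [hnm, pvALoop_eq]; simp
  have hlen : PySem.Str.len (pvALoop n "") = (L : Int) := by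
    rw [hres]; simp [PySem.Str.len_eq, hL]
  have hA : get_binary_rep n d = String.ofList (List.replicate (D - L) '0' ++ pvBin m) := by
    show (if PySem.Str.len (pvALoop n "") > d then ""
      else (PySem.List.pyRange 0 (d - PySem.Str.len (pvALoop n "")) 1).foldl
        (fun acc _ => "0" ++ acc) (pvALoop n "")) = _
    rw [hlen]
    rw [if_neg (by omega)]
    rw [pvFoldPad, hres]
    have hcount : (PySem.List.pyRange 0 (d - (L:Int)) 1).length = D - L := by
      rw [PySem.List.length_pyRange_one]; omega
    rw [hcount]; simp
  -- B side
  have hB : get_binary_rep_alt n d = String.ofList (pvMsb m D) := by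
    unfold get_binary_rep_alt
    rw [if_neg (by omega)]
    rw [PySem.List.pyRange_neg_one, List.map_map]
    have hcnt : (d - 1 - (-1)).toNat = D := by omega
    rw [hcnt]
    have hparts : (List.range D).map
        ((fun i => PySem.Int.toStr (PySem.Int.band (n >>> i.toNat) 1)) ∘ fun k => d - 1 - (k : Nat)) =
        (List.range D).map (fun k => String.ofList [if (m >>> (D - 1 - k)) &&& 1 = 1 then '1' else '0']) := by
      apply List.map_congr_left
      intro k hk
      have hk' : k < D := List.mem_range.mp hk
      have hidx : ((d - 1 - (k:Int))).toNat = D - 1 - k := by omega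
      simp only [Function.comp]
      rw [hidx, hnm]
      have hsh : ((m:Int) >>> (((D - 1 - k : Nat)) : Int)) = ((m >>> (D - 1 - k) : Nat) : Int) := by
        simp
      rw [hsh]
      have hband : PySem.Int.band ((m >>> (D - 1 - k) : Nat) : Int) 1 =
          (((m >>> (D - 1 - k)) &&& 1 : Nat) : Int) := by
        exact_mod_cast PySem.Int.band_natCast (m >>> (D - 1 - k)) 1
      rw [hband, Nat.and_one_is_mod]
      rcases Nat.mod_two_eq_zero_or_one (m >>> (D - 1 - k)) with h | h <;> rw [h] <;>
        simp <;> decide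
    rw [hparts]
    have hjoin : (PySem.Str.join ""
        ((List.range D).map (fun k => String.ofList [if (m >>> (D - 1 - k)) &&& 1 = 1 then '1' else '0']))).toList
        = pvMsb m D := by
      rw [PySem.Str.toList_join, pvMsb_eq_map]
      have h0 : ("" : String).toList = [] := rfl
      rw [h0, List.map_map]
      have hcomp : (String.toList ∘ fun k =>
          String.ofList [if (m >>> (D - 1 - k)) &&& 1 = 1 then '1' else '0']) =
          (fun k => [if (m >>> (D - 1 - k)) &&& 1 = 1 then '1' else '0']) := by
        funext k; simp
      rw [hcomp]
      have h2 := PySem.Chars.join_nil_singletons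
        ((List.range D).map (fun k => if (m >>> (D - 1 - k)) &&& 1 = 1 then '1' else '0'))
      simpa [List.map_map, Function.comp_def] using h2
    rw [← hjoin, String.ofList_toList]
  rw [hA, hB, pvMsb_eq_pad D m hLD]
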